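-- pv_equiv track=rewrite | github.com/Naveenkm007/Automated-Resume-Relevance-Check-System | resume_parser/ner.py | _split_education_entries
-- ===== SOURCE A (Python) =====
-- from typing import Dict, List, Optional, Any
--
-- EDUCATION_KEYWORDS = {
--     'bachelor', 'master', 'phd', 'doctorate', 'mba', 'bs', 'ba', 'ms', 'ma',
--     'btech', 'mtech', 'be', 'me', 'bsc', 'msc', 'degree', 'diploma',
--     'computer science', 'engineering', 'information technology', 'mathematics',
--     'physics', 'chemistry', 'business', 'economics', 'finance', 'marketing'
-- }
--
-- def _split_education_entries(education_text: str) -> List[str]: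
--     """Split education section into individual entries."""
--     if not education_text:
--         return []
--
--     # Simple approach: split by lines that start with degree or year
--     lines = education_text.split('\n')
--     entries = []
--     current_entry = []
--
--     for line in lines:
--         line = line.strip()
--         if not line:
--             continue
--
--         # Check if this starts a new education entry
--         if any(keyword in line.lower() for keyword in EDUCATION_KEYWORDS):
--             if current_entry:
--                 entries.append('\n'.join(current_entry))
--                 current_entry = []
--
--         current_entry.append(line)
--
--     # Add the last entry
--     if current_entry:
--         entries.append('\n'.join(current_entry))
--
--     return entries
-- ===== SOURCE B (Python) =====
-- from typing import List
--
-- EDUCATION_KEYWORDS = {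
--     'bachelor', 'master', 'phd', 'doctorate', 'mba', 'bs', 'ba', 'ms', 'ma',
--     'btech', 'mtech', 'be', 'me', 'bsc', 'msc', 'degree', 'diploma',
--     'computer science', 'engineering', 'information technology', 'mathematics',
--     'physics', 'chemistry', 'business', 'economics', 'finance', 'marketing'
-- }
--
-- def _is_entry_start(line: str) -> bool:
--     low = line.lower()
--     return any(k in low for k in EDUCATION_KEYWORDS)
--
-- def _split_education_entries(education_text: str) -> List[str]:
--     """Split education section into individual entries (recursive segment decomposition)."""
--     if not education_text:
--         return []
--     cleaned = [s for s in (l.strip() for l in education_text.split('\n')) if s]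
--
--     def segments(ls):
--         if not ls:
--             return []
--         j = 1
--         while j < len(ls) and not _is_entry_start(ls[j]):
--             j += 1
--         return ['\n'.join(ls[:j])] + segments(ls[j:])
--
--     return segments(cleaned)
-- ===== Notes on version B (the rewrite author's own statement) =====
-- stated objective: alternative
-- what changed: Replaced A's flush-on-keyword accumulator loop (entries/current_entry state) by first materializing the cleaned line list and then recursively slicing it into segments at keyword-line boundaries; the keyword test lowercases each line once instead of once per keyword.
import Mathlib
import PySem

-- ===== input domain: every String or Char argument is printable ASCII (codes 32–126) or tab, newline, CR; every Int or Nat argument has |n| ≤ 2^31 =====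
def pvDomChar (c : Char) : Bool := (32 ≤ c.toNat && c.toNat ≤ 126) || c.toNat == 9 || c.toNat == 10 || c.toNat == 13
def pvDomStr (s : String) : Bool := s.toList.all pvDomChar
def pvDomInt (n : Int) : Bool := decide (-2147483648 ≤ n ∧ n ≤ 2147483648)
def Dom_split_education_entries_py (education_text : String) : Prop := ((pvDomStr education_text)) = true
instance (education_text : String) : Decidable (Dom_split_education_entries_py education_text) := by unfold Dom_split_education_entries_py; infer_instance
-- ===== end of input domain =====

-- B replaces A's flush-on-keyword accumulator loop by a cleaned-lines list recursively sliced at keyword boundaries (alternative decomposition, same cost).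

def pvKeywords : List String :=
  ["bachelor", "master", "phd", "doctorate", "mba", "bs", "ba", "ms", "ma",
   "btech", "mtech", "be", "me", "bsc", "msc", "degree", "diploma",
   "computer science", "engineering", "information technology", "mathematics",
   "physics", "chemistry", "business", "economics", "finance", "marketing"]

-- any(keyword in line.lower() for keyword in EDUCATION_KEYWORDS): order-independent over the set
def pvIsKw (line : String) : Bool :=
  pvKeywords.any (fun k => PySem.Str.isIn k (PySem.Str.lower line))

-- ===== PORT A =====
-- A's loop body: strip, skip empty lines, flush current_entry on a keyword line, append the line
def pvF (st : List String × List String) (line : String) : List String × List String :=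
  let l := PySem.Str.strip line
  if l = "" then st
  else
    let st' := if pvIsKw l then
        (if st.2 ≠ [] then (st.1 ++ [PySem.Str.join "\n" st.2], ([] : List String)) else st)
      else st
    (st'.1, st'.2 ++ [l])

def split_education_entries_py (education_text : String) : List String :=
  if education_text = "" then []
  else
    -- split? is none only for an empty separator; "\n" is nonempty
    let lines := (PySem.Str.split? education_text "\n").getD []
    let st := lines.foldl pvF (([] : List String), ([] : List String))
    if st.2 ≠ [] then st.1 ++ [PySem.Str.join "\n" st.2] else st.1

-- ===== PORT B =====
-- segments(ls): first line plus following non-keyword lines form one entry; recurse on the rest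
def pvSegments : List String → List String
  | [] => []
  | l :: ls =>
    PySem.Str.join "\n" (l :: ls.takeWhile (fun x => !pvIsKw x)) ::
      pvSegments (ls.dropWhile (fun x => !pvIsKw x))
termination_by ls => ls.length
decreasing_by
  simp only [List.length_cons]
  exact Nat.lt_succ_of_le (List.length_dropWhile_le _ _)

def split_education_entries_py_alt (education_text : String) : List String :=
  if education_text = "" then []
  else
    -- split? is none only for an empty separator; "\n" is nonempty
    pvSegments ((((PySem.Str.split? education_text "\n").getD []).map PySem.Str.strip).filter
      (fun s => s != ""))

-- ===== PRECONDITION & SPEC =====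
def Spec_split_education_entries_py (education_text : String) (out : List String) : Prop := out = split_education_entries_py_alt education_text
instance (education_text : String) (out : List String) : Decidable (Spec_split_education_entries_py education_text out) := by unfold Spec_split_education_entries_py; infer_instance

-- ===== CLAIM (what is proved, stated in full; the proofs are below) =====
def Claim_equal_split_education_entries_py : Prop := ∀ (education_text : String), Dom_split_education_entries_py education_text → Spec_split_education_entries_py education_text (split_education_entries_py education_text)

-- ===== LEMMAS AND PROOFS =====

-- A's loop body restricted to cleaned (stripped, nonempty) lines
def pvGA (st : List String × List String) (l : String) : List String × List String :=
  let st' := if pvIsKw l then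
      (if st.2 ≠ [] then (st.1 ++ [PySem.Str.join "\n" st.2], ([] : List String)) else st)
    else st
  (st'.1, st'.2 ++ [l])

def pvFinish (st : List String × List String) : List String :=
  if st.2 ≠ [] then st.1 ++ [PySem.Str.join "\n" st.2] else st.1

theorem pvF_empty (st : List String × List String) (x : String)
    (h : PySem.Str.strip x = "") : pvF st x = st := by
  simp [pvF, h]

theorem pvF_ne (st : List String × List String) (x : String)
    (h : ¬ PySem.Str.strip x = "") : pvF st x = pvGA st (PySem.Str.strip x) := by
  simp [pvF, pvGA, h]

theorem pvSegments_cons (l : String) (ls : List String) :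
    pvSegments (l :: ls)
    = PySem.Str.join "\n" (l :: ls.takeWhile (fun x => !pvIsKw x)) ::
        pvSegments (ls.dropWhile (fun x => !pvIsKw x)) := by
  rw [pvSegments.eq_def]

-- A's fold over raw lines equals the bare fold over the cleaned (stripped, nonempty) lines
theorem pvFoldClean (lines : List String) (st : List String × List String) :
    lines.foldl pvF st
    = ((lines.map PySem.Str.strip).filter (fun s => s != "")).foldl pvGA st := by
  induction lines generalizing st with
  | nil => rfl
  | cons x xs ih =>
    rw [List.foldl_cons, List.map_cons, List.filter_cons]
    by_cases h : PySem.Str.strip x = ""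
    · rw [pvF_empty st x h, ih]
      simp [h]
    · rw [pvF_ne st x h, ih]
      simp [h, List.foldl_cons]

theorem pvMain (ls : List String) (e c : List String) (hc : c ≠ []) :
    pvFinish (ls.foldl pvGA (e, c))
    = e ++ (PySem.Str.join "\n" (c ++ ls.takeWhile (fun x => !pvIsKw x))
        :: pvSegments (ls.dropWhile (fun x => !pvIsKw x))) := by
  induction ls generalizing e c with
  | nil => simp [pvFinish, hc, pvSegments]
  | cons l ls ih =>
    by_cases hk : pvIsKw l
    · have hstep : pvGA (e, c) l = (e ++ [PySem.Str.join "\n" c], [l]) := by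
        simp [pvGA, hk, hc]
      rw [List.foldl_cons, hstep, ih _ _ (by simp)]
      simp [hk, pvSegments_cons, List.append_assoc]
    · have hstep : pvGA (e, c) l = (e, c ++ [l]) := by simp [pvGA, hk]
      rw [List.foldl_cons, hstep, ih _ _ (by simp)]
      simp [hk]

theorem pvGA_nil (l : String) : pvGA ([], []) l = ([], [l]) := by
  simp [pvGA]

-- ===== VERDICT (by name: the statement is the Claim_ definition above) =====
theorem split_education_entries_py_spec : Claim_equal_split_education_entries_py := by
  intro t _
  unfold Spec_split_education_entries_py split_education_entries_py split_education_entries_py_alt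
  by_cases ht : t = ""
  · simp [ht]
  · simp only [ht, if_false]
    rw [pvFoldClean]
    cases hcl : (((PySem.Str.split? t "\n").getD []).map PySem.Str.strip).filter (fun s => s != "") with
    | nil => simp [pvSegments]
    | cons l ls =>
      show pvFinish (List.foldl pvGA ([], []) (l :: ls)) = _
      rw [List.foldl_cons, pvGA_nil, pvMain _ _ _ (by simp)]
      rw [pvSegments_cons]
      simp
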